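-- pv_equiv track=rewrite | github.com/Darnell-Foster/Card-Game | a3.py | sameSuit
-- ===== SOURCE A (Python) =====
-- def sameSuit(ddeck):
--     """takes in 3D-list for board
--         returns boolean"""
--     #Checks for matching suit ""SP", "CL", "HR", "DM"
--
--     """
--     Checks row 1 colum 1 and diagonals then shifts too row 2 colum 2 and diagonals does this one more time for 3
--     if it matchs at any point stops checking and returns true
--     """
--     for i in range(3):
--         if (ddeck[i][0][0] == ddeck[i][1][0] == ddeck[i][2][0]) or (ddeck[0][i][0] == ddeck[1][i][0] == ddeck[2][i][0]) or (ddeck[0][0][0] == ddeck[1][1][0] == ddeck[2][2][0]) or (ddeck[2][0][0] == ddeck[1][1][0] == ddeck[0][2][0]):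
--             return True
-- ===== SOURCE B (Python) =====
-- def sameSuit(ddeck):
--     """takes in 3D-list for board
--         returns boolean"""
--     # Flatten the board into the 9 suit cells, then build, per distinct suit,
--     # a 9-bit occupancy mask; a matching line exists iff some suit's mask
--     # covers one of the 8 winning bit patterns.
--     cells = [ddeck[i][j][0] for i in range(3) for j in range(3)]
--     WIN = (7, 56, 448, 73, 146, 292, 273, 84)
--     BITS = (1, 2, 4, 8, 16, 32, 64, 128, 256)
--     for suit in set(cells):
--         m = sum(bit for bit, c in zip(BITS, cells) if c == suit)
--         if any(m & w == w for w in WIN):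
--             return True
-- ===== Notes on version B (the rewrite author's own statement) =====
-- stated objective: alternative
-- what changed: A loops i over range(3) re-testing rows/columns and both diagonals with chained comparisons on the 2D indices; B flattens the board into the 9 suit cells, builds a 9-bit occupancy bitmask for each distinct suit, and reports a match iff some suit's mask covers one of the 8 winning bit patterns, preserving the implicit None.
-- outside the precondition, e.g. on sameSuit([[['S'], ['S'], ['S']]]): A returns True, B raises IndexError
import Mathlib
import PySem

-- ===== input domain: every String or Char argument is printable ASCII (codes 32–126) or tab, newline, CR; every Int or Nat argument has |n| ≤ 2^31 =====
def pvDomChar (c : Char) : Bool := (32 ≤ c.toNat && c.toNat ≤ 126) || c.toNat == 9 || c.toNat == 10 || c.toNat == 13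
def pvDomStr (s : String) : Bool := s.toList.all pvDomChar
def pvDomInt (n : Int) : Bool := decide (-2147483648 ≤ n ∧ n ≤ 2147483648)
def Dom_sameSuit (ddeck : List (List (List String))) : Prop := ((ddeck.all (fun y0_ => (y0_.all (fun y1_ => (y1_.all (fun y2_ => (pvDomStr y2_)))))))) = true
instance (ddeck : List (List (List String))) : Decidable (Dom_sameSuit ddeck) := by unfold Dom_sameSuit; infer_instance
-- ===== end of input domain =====

-- B replaces A's range(3) loop of chained row/column/diagonal comparisons by a bitmask algorithm:
-- flatten the board to 9 suit cells, build a 9-bit occupancy mask per distinct suit, and test each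
-- mask against the 8 winning bit patterns; objective: alternative (same cost), implicit None kept.


-- ===== PORT A =====
-- ddeck[i][j][0]; exact under Pre_ (all indices in range there)
def pvGetA (d : List (List (List String))) (i j : Int) : String :=
  PySem.List.pyGetD (PySem.List.pyGetD (PySem.List.pyGetD d i []) j []) 0 ""

def sameSuitGo (d : List (List (List String))) : List Int → Option Bool
  | [] => none
  | i :: rest =>
    if ((pvGetA d i 0 == pvGetA d i 1) && (pvGetA d i 1 == pvGetA d i 2)) ||
       ((pvGetA d 0 i == pvGetA d 1 i) && (pvGetA d 1 i == pvGetA d 2 i)) ||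
       ((pvGetA d 0 0 == pvGetA d 1 1) && (pvGetA d 1 1 == pvGetA d 2 2)) ||
       ((pvGetA d 2 0 == pvGetA d 1 1) && (pvGetA d 1 1 == pvGetA d 0 2)) then
      some true
    else
      sameSuitGo d rest

def sameSuit (ddeck : List (List (List String))) : Option Bool :=
  sameSuitGo ddeck (PySem.List.pyRange 0 3 1)

-- ===== PORT B =====
-- cells = [ddeck[i][j][0] for i in range(3) for j in range(3)]  (ddeck[i][j][0] via pyGetD; exact under Pre_)
def pvCells (ddeck : List (List (List String))) : List String :=
  (PySem.List.pyRange 0 3 1).flatMap (fun i =>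
    (PySem.List.pyRange 0 3 1).map (fun j =>
      PySem.List.pyGetD (PySem.List.pyGetD (PySem.List.pyGetD ddeck i []) j []) 0 ""))

def pvWin : List Int := [7, 56, 448, 73, 146, 292, 273, 84]
def pvBits : List Int := [1, 2, 4, 8, 16, 32, 64, 128, 256]

-- m = sum(bit for bit, c in zip(BITS, cells) if c == suit)
def pvMask (suit : String) (cells : List String) : Int :=
  (pvBits.zip cells).foldl (fun acc p => if p.2 == suit then acc + p.1 else acc) 0

-- any(m & w == w for w in WIN)
def pvSuitWin (cells : List String) (suit : String) : Bool :=
  pvWin.any (fun w => PySem.Int.band (pvMask suit cells) w == w)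

-- for suit in set(cells): if any(...): return True   (result is order-independent: True/None only)
def bGo (cells : List String) : List String → Option Bool
  | [] => none
  | s :: rest => if pvSuitWin cells s then some true else bGo cells rest

def sameSuit_alt (ddeck : List (List (List String))) : Option Bool :=
  bGo (pvCells ddeck) (PySem.Set.ofList (pvCells ddeck))

-- ===== PRECONDITION & SPEC =====
-- A raises IndexError unless the board has at least 3 rows, the first 3 rows have at least 3 cells
-- each, and each of those 9 cells is a nonempty list; Pre_ is exactly that. It also excludes some
-- malformed boards on which A happens to return True before reaching a missing cell (short-circuit),
-- while B reads all 9 cells first and raises there.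
def Pre_sameSuit (ddeck : List (List (List String))) : Prop :=
  3 ≤ ddeck.length ∧ ∀ r ∈ ddeck.take 3, 3 ≤ r.length ∧ ∀ c ∈ r.take 3, c ≠ []
instance (ddeck : List (List (List String))) : Decidable (Pre_sameSuit ddeck) := by
  unfold Pre_sameSuit; infer_instance

def pvWitness_sameSuit : List (List (List String)) :=
  [[["SP1"], ["CL2"], ["HR3"]], [["DM4"], ["SP5"], ["CL6"]], [["HR7"], ["DM8"], ["SP9"]]]

def Spec_sameSuit (ddeck : List (List (List String))) (out : Option Bool) : Prop := out = sameSuit_alt ddeck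
instance (ddeck : List (List (List String))) (out : Option Bool) : Decidable (Spec_sameSuit ddeck out) := by unfold Spec_sameSuit; infer_instance

-- ===== CLAIM (what is proved, stated in full; the proofs are below) =====
def Claim_equal_sameSuit : Prop := ∀ (ddeck : List (List (List String))), Dom_sameSuit ddeck → Pre_sameSuit ddeck → Spec_sameSuit ddeck (sameSuit ddeck)

-- ===== LEMMAS AND PROOFS =====

theorem bGo_eq (cells : List String) (l : List String) :
    bGo cells l = if l.any (pvSuitWin cells) then some true else none := by
  induction l with
  | nil => rfl
  | cons s rest ih =>
    simp only [bGo, List.any_cons, ih]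
    by_cases h : pvSuitWin cells s = true <;> simp [h]

theorem any_ofList {α : Type} [BEq α] [LawfulBEq α] (l : List α) (p : α → Bool) :
    (PySem.Set.ofList l).any p = l.any p := by
  rw [Bool.eq_iff_iff]
  simp only [List.any_eq_true, PySem.Set.mem_ofList]

theorem pvSuitWin_eval (a0 a1 a2 a3 a4 a5 a6 a7 a8 x : String) :
    pvSuitWin [a0, a1, a2, a3, a4, a5, a6, a7, a8] x =
      ((a0 == x) && (a1 == x) && (a2 == x) || (a3 == x) && (a4 == x) && (a5 == x) ||
       (a6 == x) && (a7 == x) && (a8 == x) || (a0 == x) && (a3 == x) && (a6 == x) ||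
       (a1 == x) && (a4 == x) && (a7 == x) || (a2 == x) && (a5 == x) && (a8 == x) ||
       (a0 == x) && (a4 == x) && (a8 == x) || (a2 == x) && (a4 == x) && (a6 == x)) := by
  simp only [pvSuitWin, pvMask, pvBits, pvWin, List.zip, List.zipWith, List.foldl,
    List.any_cons, List.any_nil]
  generalize (a0 == x) = b0
  generalize (a1 == x) = b1
  generalize (a2 == x) = b2
  generalize (a3 == x) = b3
  generalize (a4 == x) = b4
  generalize (a5 == x) = b5
  generalize (a6 == x) = b6
  generalize (a7 == x) = b7
  generalize (a8 == x) = b8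
  revert b0 b1 b2 b3 b4 b5 b6 b7 b8
  decide

theorem bigAny (a0 a1 a2 a3 a4 a5 a6 a7 a8 : String) :
    ([a0, a1, a2, a3, a4, a5, a6, a7, a8].any fun x =>
      ((a0 == x) && (a1 == x) && (a2 == x) || (a3 == x) && (a4 == x) && (a5 == x) ||
       (a6 == x) && (a7 == x) && (a8 == x) || (a0 == x) && (a3 == x) && (a6 == x) ||
       (a1 == x) && (a4 == x) && (a7 == x) || (a2 == x) && (a5 == x) && (a8 == x) ||
       (a0 == x) && (a4 == x) && (a8 == x) || (a2 == x) && (a4 == x) && (a6 == x))) =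
    ((a0 == a1) && (a1 == a2) || (a3 == a4) && (a4 == a5) || (a6 == a7) && (a7 == a8) ||
     (a0 == a3) && (a3 == a6) || (a1 == a4) && (a4 == a7) || (a2 == a5) && (a5 == a8) ||
     (a0 == a4) && (a4 == a8) || (a6 == a4) && (a4 == a2)) := by
  rw [Bool.eq_iff_iff]
  constructor
  · intro h
    rw [List.any_eq_true] at h
    obtain ⟨x, -, hf⟩ := h
    simp only [Bool.or_eq_true, Bool.and_eq_true, beq_iff_eq] at hf ⊢
    rcases hf with ((((((⟨⟨h1,h2⟩,h3⟩|⟨⟨h1,h2⟩,h3⟩)|⟨⟨h1,h2⟩,h3⟩)|⟨⟨h1,h2⟩,h3⟩)|⟨⟨h1,h2⟩,h3⟩)|⟨⟨h1,h2⟩,h3⟩)|⟨⟨h1,h2⟩,h3⟩)|⟨⟨h1,h2⟩,h3⟩ <;>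
      · have hA := h1.trans h2.symm
        have hB := h2.trans h3.symm
        have hA' := hA.symm
        have hB' := hB.symm
        tauto
  · intro h
    rw [List.any_eq_true]
    simp only [Bool.or_eq_true, Bool.and_eq_true, beq_iff_eq] at h
    rcases h with ((((((⟨h1,h2⟩|⟨h1,h2⟩)|⟨h1,h2⟩)|⟨h1,h2⟩)|⟨h1,h2⟩)|⟨h1,h2⟩)|⟨h1,h2⟩)|⟨h1,h2⟩
    · subst_vars; exact ⟨a2, by simp, by simp⟩
    · subst_vars; exact ⟨a5, by simp, by simp⟩
    · subst_vars; exact ⟨a8, by simp, by simp⟩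
    · subst_vars; exact ⟨a6, by simp, by simp⟩
    · subst_vars; exact ⟨a7, by simp, by simp⟩
    · subst_vars; exact ⟨a8, by simp, by simp⟩
    · subst_vars; exact ⟨a8, by simp, by simp⟩
    · subst_vars; exact ⟨a6, by simp, by simp⟩

theorem anyWin (a0 a1 a2 a3 a4 a5 a6 a7 a8 : String) :
    ([a0, a1, a2, a3, a4, a5, a6, a7, a8].any (pvSuitWin [a0, a1, a2, a3, a4, a5, a6, a7, a8])) =
    ((a0 == a1) && (a1 == a2) || (a3 == a4) && (a4 == a5) || (a6 == a7) && (a7 == a8) ||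
     (a0 == a3) && (a3 == a6) || (a1 == a4) && (a4 == a7) || (a2 == a5) && (a5 == a8) ||
     (a0 == a4) && (a4 == a8) || (a6 == a4) && (a4 == a2)) := by
  have h : pvSuitWin [a0, a1, a2, a3, a4, a5, a6, a7, a8] = fun x =>
      ((a0 == x) && (a1 == x) && (a2 == x) || (a3 == x) && (a4 == x) && (a5 == x) ||
       (a6 == x) && (a7 == x) && (a8 == x) || (a0 == x) && (a3 == x) && (a6 == x) ||
       (a1 == x) && (a4 == x) && (a7 == x) || (a2 == x) && (a5 == x) && (a8 == x) ||
       (a0 == x) && (a4 == x) && (a8 == x) || (a2 == x) && (a4 == x) && (a6 == x)) :=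
    funext fun x => pvSuitWin_eval a0 a1 a2 a3 a4 a5 a6 a7 a8 x
  rw [h, bigAny]

theorem pv_eq (d : List (List (List String))) : sameSuit d = sameSuit_alt d := by
  have hcells : pvCells d =
      [pvGetA d 0 0, pvGetA d 0 1, pvGetA d 0 2, pvGetA d 1 0, pvGetA d 1 1, pvGetA d 1 2,
       pvGetA d 2 0, pvGetA d 2 1, pvGetA d 2 2] := rfl
  have hr : PySem.List.pyRange 0 3 1 = [0, 1, 2] := by decide
  rw [sameSuit_alt, bGo_eq, any_ofList, hcells]
  rw [anyWin]
  rw [sameSuit, hr]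
  simp only [sameSuitGo]
  generalize ((pvGetA d 0 0 == pvGetA d 0 1) && (pvGetA d 0 1 == pvGetA d 0 2)) = r0
  generalize ((pvGetA d 1 0 == pvGetA d 1 1) && (pvGetA d 1 1 == pvGetA d 1 2)) = r1
  generalize ((pvGetA d 2 0 == pvGetA d 2 1) && (pvGetA d 2 1 == pvGetA d 2 2)) = r2
  generalize ((pvGetA d 0 0 == pvGetA d 1 0) && (pvGetA d 1 0 == pvGetA d 2 0)) = c0
  generalize ((pvGetA d 0 1 == pvGetA d 1 1) && (pvGetA d 1 1 == pvGetA d 2 1)) = c1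
  generalize ((pvGetA d 0 2 == pvGetA d 1 2) && (pvGetA d 1 2 == pvGetA d 2 2)) = c2
  generalize ((pvGetA d 0 0 == pvGetA d 1 1) && (pvGetA d 1 1 == pvGetA d 2 2)) = e1
  generalize ((pvGetA d 2 0 == pvGetA d 1 1) && (pvGetA d 1 1 == pvGetA d 0 2)) = e2
  revert r0 r1 r2 c0 c1 c2 e1 e2
  decide

-- ===== VERDICT (by name: the statement is the Claim_ definition above) =====
theorem sameSuit_spec : Claim_equal_sameSuit := by
  intro d _ _
  exact pv_eq d
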